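-- pv_equiv track=rewrite | github.com/pypi-data/pypi-code-130 | wwpdb.apps.seqmodule/wwpdb.apps.seqmodule-0.24.tar.gz/wwpdb/apps/seqmodule/control/SummaryView_v2.py | __checkPartRangeError
-- ===== SOURCE A (Python) =====
-- def __checkPartRangeError(seqLength, partList):
--     """Check part range definition"""
--     if len(partList) < 1:
--         return False, "No part information defined."
--     #
--     try:
--         status = True
--         text = ""
--         for i in range(0, len(partList)):
--             if text:
--                 text += ", "
--             #
--             text += "Part '" + str(partList[i][0]) + "' - ( " + str(partList[i][1]) + ", " + str(partList[i][2]) + " )"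
--             #
--             seqNumBeg = int(partList[i][1])
--             seqNumEnd = int(partList[i][2])
--             if seqNumEnd < seqNumBeg:
--                 status = False
--             if (i == 0) and (seqNumBeg != 1):
--                 status = False
--             if (i == (len(partList) - 1)) and (seqNumEnd != seqLength):
--                 status = False
--             if i > 0:
--                 prevNumEnd = int(partList[i - 1][2])
--                 if seqNumBeg != (prevNumEnd + 1):
--                     status = False
--                 #
--             #
--         #
--         return status, text
--     except Exception as _e:  # noqa: F841
--         text = ""
--         for i in range(0, len(partList)):
--             if text:
--                 text += ", "
--             #
--             text += "Part '" + str(partList[i][0]) + "' - ( " + str(partList[i][1]) + ", " + str(partList[i][2]) + " )"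
--         #
--         return False, text
-- ===== SOURCE B (Python) =====
-- def __checkPartRangeError(seqLength, partList):
--     """Check part range definition"""
--     if len(partList) < 1:
--         return False, "No part information defined."
--     #
--     text = ", ".join("Part '" + str(p[0]) + "' - ( " + str(p[1]) + ", " + str(p[2]) + " )" for p in partList)
--     try:
--         begs = [int(p[1]) for p in partList]
--         ends = [int(p[2]) for p in partList]
--         status = (begs == [1] + [e + 1 for e in ends[:-1]]
--                   and ends[-1] == seqLength
--                   and all(b <= e for b, e in zip(begs, ends)))
--         return status, text
--     except Exception:
--         return False, text
-- ===== Notes on version B (the rewrite author's own statement) =====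
-- stated objective: alternative
-- what changed: B builds the text with one join and replaces A's indexed validation loop (mutable status flag, look-back indexing partList[i-1][2]) by a declarative check: parse all begins and ends into two lists and compare the begin list against [1] plus the shifted end list, check the final end, and a zip all() for end>=begin.
import Mathlib
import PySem

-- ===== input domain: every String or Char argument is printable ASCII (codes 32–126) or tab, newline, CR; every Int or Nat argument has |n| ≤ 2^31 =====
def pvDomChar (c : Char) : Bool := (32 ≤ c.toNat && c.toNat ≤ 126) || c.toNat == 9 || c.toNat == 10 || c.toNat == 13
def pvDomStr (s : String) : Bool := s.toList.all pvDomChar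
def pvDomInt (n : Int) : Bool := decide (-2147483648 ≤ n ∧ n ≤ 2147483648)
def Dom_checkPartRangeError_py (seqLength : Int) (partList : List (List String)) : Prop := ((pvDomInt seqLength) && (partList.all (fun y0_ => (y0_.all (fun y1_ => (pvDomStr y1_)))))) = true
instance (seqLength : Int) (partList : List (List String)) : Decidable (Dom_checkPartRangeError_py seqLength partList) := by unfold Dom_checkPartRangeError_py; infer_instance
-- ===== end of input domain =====

-- B builds the text with one join and replaces A's indexed validation loop (status flag,
-- look-back indexing) by a declarative check on fully parsed begin/end lists: begin list
-- equals [1] + shifted end list, final end equals seqLength, zip all end>=begin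
-- (objective: alternative).

-- ===== PORT A =====
-- one text-accumulation step of A's loops:  if text: text += ", " ; text += "Part '" + …
def pvTextStep (text : String) (p : List String) : String :=
  (if text ≠ "" then text ++ ", " else text) ++ "Part '" ++ PySem.List.pyGetD p 0 ""
    ++ "' - ( " ++ PySem.List.pyGetD p 1 "" ++ ", " ++ PySem.List.pyGetD p 2 "" ++ " )"

-- the except-branch loop of A: rebuild the full text
def pvExceptLoop (partList : List (List String)) : String :=
  partList.foldl pvTextStep ""

-- A's try-loop over i in range(0, len(partList)); PySem.Int.ofStr? = none is the int()
-- ValueError, handled by jumping to the except branch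
def pvAGo (seqLength : Int) (pl : List (List String)) (i : Nat) (status : Bool) (text : String) : Bool × String :=
  if h : i < pl.length then
    let p := pl[i]
    let text' := pvTextStep text p
    match PySem.Int.ofStr? (PySem.List.pyGetD p 1 ""), PySem.Int.ofStr? (PySem.List.pyGetD p 2 "") with
    | some seqNumBeg, some seqNumEnd =>
      let s1 := if seqNumEnd < seqNumBeg then false else status
      let s2 := if i = 0 ∧ seqNumBeg ≠ 1 then false else s1
      let s3 := if i = pl.length - 1 ∧ seqNumEnd ≠ seqLength then false else s2
      if i > 0 then
        match PySem.Int.ofStr? (PySem.List.pyGetD (PySem.List.pyGetD pl ((i : Int) - 1) []) 2 "") with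
        | some prevNumEnd =>
            pvAGo seqLength pl (i + 1) (if seqNumBeg ≠ prevNumEnd + 1 then false else s3) text'
        | none => (false, pvExceptLoop pl)
      else pvAGo seqLength pl (i + 1) s3 text'
    | _, _ => (false, pvExceptLoop pl)
  else (status, text)
termination_by pl.length - i

def checkPartRangeError_py (seqLength : Int) (partList : List (List String)) : Bool × String :=
  if partList.length < 1 then (false, "No part information defined.")
  else pvAGo seqLength partList 0 true ""

-- ===== PORT B =====
-- "Part '" + str(p[0]) + "' - ( " + str(p[1]) + ", " + str(p[2]) + " )"
def pvPartText (p : List String) : String :=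
  "Part '" ++ PySem.List.pyGetD p 0 "" ++ "' - ( " ++ PySem.List.pyGetD p 1 ""
    ++ ", " ++ PySem.List.pyGetD p 2 "" ++ " )"

-- int(p[1]) / int(p[2]); none = ValueError
def pvF1 (p : List String) : Option Int := PySem.Int.ofStr? (PySem.List.pyGetD p 1 "")
def pvF2 (p : List String) : Option Int := PySem.Int.ofStr? (PySem.List.pyGetD p 2 "")

def checkPartRangeError_py_alt (seqLength : Int) (partList : List (List String)) : Bool × String :=
  if partList.length < 1 then (false, "No part information defined.")
  else
    let text := PySem.Str.join ", " (partList.map pvPartText)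
    -- begs = [int(p[1]) …]; ends = [int(p[2]) …]; a none aborts to the except branch
    match partList.mapM pvF1, partList.mapM pvF2 with
    | some begs, some ends =>
      -- begs == [1] + [e+1 for e in ends[:-1]]  and  ends[-1] == seqLength  and  all(b <= e …)
      ((decide (begs = 1 :: ends.dropLast.map (fun e => e + 1))
          && decide (PySem.List.pyGet? ends (-1) = some seqLength))
          && (begs.zip ends).all (fun be => decide (be.1 ≤ be.2)), text)
    | _, _ => (false, text)

-- ===== PRECONDITION & SPEC =====
-- Pre_ excludes exactly the inputs on which Python A raises (an IndexError, from a part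
-- entry with fewer than 3 fields); Python B raises there as well.
def Pre_checkPartRangeError_py (seqLength : Int) (partList : List (List String)) : Prop :=
  ∀ p ∈ partList, 3 ≤ p.length
instance (seqLength : Int) (partList : List (List String)) : Decidable (Pre_checkPartRangeError_py seqLength partList) := by unfold Pre_checkPartRangeError_py; infer_instance

def pvWitness_checkPartRangeError_py : Int × List (List String) :=
  (5, [["A", "1", "3"], ["B", "4", "5"]])

def Spec_checkPartRangeError_py (seqLength : Int) (partList : List (List String)) (out : Bool × String) : Prop := out = checkPartRangeError_py_alt seqLength partList
instance (seqLength : Int) (partList : List (List String)) (out : Bool × String) : Decidable (Spec_checkPartRangeError_py seqLength partList out) := by unfold Spec_checkPartRangeError_py; infer_instance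

-- ===== CLAIM (what is proved, stated in full; the proofs are below) =====
def Claim_equal_checkPartRangeError_py : Prop := ∀ (seqLength : Int) (partList : List (List String)), Dom_checkPartRangeError_py seqLength partList → Pre_checkPartRangeError_py seqLength partList → Spec_checkPartRangeError_py seqLength partList (checkPartRangeError_py seqLength partList)

-- ===== LEMMAS AND PROOFS =====

-- proof-side intermediate: A's validation as a structural loop carrying the previous end
def pvBLoop (l : List (List String)) (status : Bool) (prevEnd : Option Int) : Option (Bool × Option Int) :=
  match l with
  | [] => some (status, prevEnd)
  | p :: rest =>
    match PySem.Int.ofStr? (PySem.List.pyGetD p 1 ""), PySem.Int.ofStr? (PySem.List.pyGetD p 2 "") with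
    | some beg, some en =>
      let s1 := if en < beg then false else status
      let s2 := match prevEnd with
        | none => if beg ≠ 1 then false else s1
        | some pe => if beg ≠ pe + 1 then false else s1
      pvBLoop rest s2 (some en)
    | _, _ => none

-- proof-side: the chain condition checked elementwise
def pvChain : Option Int → List Int → List Int → Bool
  | _, [], _ => true
  | _, _ :: _, [] => true
  | pe, b :: bs, e :: es =>
      (decide (b ≤ e) && (match pe with | none => decide (b = 1) | some q => decide (b = q + 1)))
        && pvChain (some e) bs es

-- proof-side: the expected begin list given the previous end
def pvExp : Option Int → List Int → List Int
  | _, [] => []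
  | pe, e :: es => (match pe with | none => 1 | some q => q + 1) :: pvExp (some e) es

lemma pvPartText_ne_nil (p : List String) : pvPartText p ≠ "" := by
  intro h
  have := congrArg String.toList h
  simp [pvPartText, String.toList_append] at this

lemma pvTextStep_eq (t : String) (p : List String) (h : t ≠ "") :
    pvTextStep t p = t ++ ", " ++ pvPartText p := by
  rw [String.toList_inj.symm]
  simp [pvTextStep, pvPartText, h, String.toList_append]

-- A's text fold, started from a nonempty string, joins that string with the parts
lemma pvFold_join (l : List (List String)) :
    ∀ (t : String), t ≠ "" →
      l.foldl pvTextStep t = PySem.Str.join ", " (t :: l.map pvPartText) := by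
  induction l with
  | nil =>
    intro t ht
    rw [String.toList_inj.symm]
    simp [PySem.Str.toList_join, PySem.Chars.join_singleton]
  | cons p rest ih =>
    intro t ht
    have hne : pvTextStep t p ≠ "" := by
      intro h
      have := congrArg String.toList h
      simp [pvTextStep, String.toList_append] at this
    have hstep : (p :: rest).foldl pvTextStep t = rest.foldl pvTextStep (pvTextStep t p) := rfl
    rw [hstep, ih _ hne, String.toList_inj.symm, pvTextStep_eq t p ht]
    cases hr : rest.map pvPartText with
    | nil =>
      simp [PySem.Str.toList_join, -List.map_map, hr, PySem.Chars.join_singleton,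
        PySem.Chars.join_cons_cons, String.toList_append]
    | cons b bs =>
      simp [PySem.Str.toList_join, -List.map_map, hr, PySem.Chars.join_cons_cons,
        String.toList_append]

lemma pvExceptLoop_eq_join (pl : List (List String)) :
    pvExceptLoop pl = PySem.Str.join ", " (pl.map pvPartText) := by
  cases pl with
  | nil =>
    rw [String.toList_inj.symm]
    simp [pvExceptLoop, PySem.Str.toList_join, PySem.Chars.join_nil]
  | cons p rest =>
    have h1 : pvTextStep "" p = pvPartText p := by
      rw [String.toList_inj.symm]
      simp [pvTextStep, pvPartText, String.toList_append]
    calc pvExceptLoop (p :: rest) = rest.foldl pvTextStep (pvTextStep "" p) := rfl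
      _ = rest.foldl pvTextStep (pvPartText p) := by rw [h1]
      _ = PySem.Str.join ", " (pvPartText p :: rest.map pvPartText) :=
          pvFold_join rest _ (pvPartText_ne_nil p)
      _ = PySem.Str.join ", " ((p :: rest).map pvPartText) := by simp

-- the loop correspondence: A's indexed loop from position i against the structural loop
-- over the remaining suffix, with prevEnd the parsed end of part i-1
lemma pvAGo_eq (seqLength : Int) (pl : List (List String)) (hpl : pl ≠ []) :
    ∀ (l₂ : List (List String)) (i : Nat) (status : Bool) (text : String) (prevEnd : Option Int),
      i ≤ pl.length → pl.drop i = l₂ →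
      (i = 0 ↔ prevEnd = none) →
      (∀ pe, prevEnd = some pe →
        PySem.Int.ofStr? (PySem.List.pyGetD (PySem.List.pyGetD pl ((i : Int) - 1) []) 2 "") = some pe) →
      (i = pl.length → prevEnd ≠ some seqLength → status = false) →
      pvAGo seqLength pl i status text =
        match pvBLoop l₂ status prevEnd with
        | some (st, pe') => (if pe' ≠ some seqLength then false else st, l₂.foldl pvTextStep text)
        | none => (false, pvExceptLoop pl) := by
  intro l₂
  induction l₂ with
  | nil =>
    intro i status text prevEnd hi hdrop hiff hparse hlast
    have hlen : i = pl.length := by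
      have := congrArg List.length hdrop
      simp [List.length_drop] at this
      omega
    rw [pvAGo, dif_neg (by omega)]
    cases prevEnd with
    | none =>
      exact absurd (List.length_eq_zero_iff.mp (hlen ▸ (hiff.mpr rfl))) hpl
    | some pe =>
      by_cases hpe : pe = seqLength
      · simp [pvBLoop, hpe]
      · simp [pvBLoop, hpe, hlast hlen (by simp [hpe])]
  | cons p rest ih =>
    intro i status text prevEnd hi hdrop hiff hparse hlast
    have hlt : i < pl.length := by
      have := congrArg List.length hdrop
      simp [List.length_drop] at this
      omega
    have hcons := List.drop_eq_getElem_cons hlt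
    rw [hdrop] at hcons
    have hgetp : pl[i] = p := (List.cons.injEq .. ▸ hcons).1.symm
    have hdrop1 : pl.drop (i + 1) = rest := ((List.cons.injEq .. ▸ hcons).2).symm
    rw [pvAGo, dif_pos hlt]
    simp only [hgetp]
    cases hb : PySem.Int.ofStr? (PySem.List.pyGetD p 1 "") with
    | none => simp [pvBLoop, hb]
    | some b =>
    cases he : PySem.Int.ofStr? (PySem.List.pyGetD p 2 "") with
    | none => simp [pvBLoop, hb, he]
    | some e =>
    simp only []
    cases prevEnd with
    | none =>
      have hi0 : i = 0 := hiff.mpr rfl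
      rw [if_neg (by omega : ¬ i > 0)]
      rw [ih (i + 1) _ (pvTextStep text p) (some e) (by omega) hdrop1
        (iff_of_false (by omega) (by simp))
        (by intro pe hpe
            injection hpe with hpe; subst hpe
            have hc : ((i + 1 : Nat) : Int) - 1 = ((i : Nat) : Int) := by push_cast; ring
            rw [hc, PySem.List.pyGetD_natCast, List.getD_eq_getElem _ _ hlt, hgetp, he])
        (by intro hil hne
            have hcond : i = pl.length - 1 ∧ e ≠ seqLength := by
              constructor
              · omega
              · intro hx; exact hne (by rw [hx])
            simp [hcond])]
      rw [pvBLoop]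
      simp only [hb, he, hi0]
      cases hre : rest with
      | nil =>
        have hilast : (0 : Nat) = pl.length - 1 := by
          have := congrArg List.length hdrop1
          simp [List.length_drop, hre] at this
          omega
        rw [pvBLoop, pvBLoop]
        by_cases hesl : e = seqLength
        · simp [hesl, List.foldl]
        · simp [hesl, List.foldl]
      | cons q rest' =>
        have hinl : ¬ ((0 : Nat) = pl.length - 1) := by
          have := congrArg List.length hdrop1
          simp [List.length_drop, hre] at this
          omega
        simp [hinl, List.foldl]
    | some pe =>
      have hi0 : i ≠ 0 := by intro h; simpa using hiff.mp h
      rw [if_pos (by omega : i > 0)]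
      simp only [hparse pe rfl]
      rw [ih (i + 1) _ (pvTextStep text p) (some e) (by omega) hdrop1
        (iff_of_false (by omega) (by simp))
        (by intro pe' hpe'
            injection hpe' with hpe'; subst hpe'
            have hc : ((i + 1 : Nat) : Int) - 1 = ((i : Nat) : Int) := by push_cast; ring
            rw [hc, PySem.List.pyGetD_natCast, List.getD_eq_getElem _ _ hlt, hgetp, he])
        (by intro hil hne
            have hcond : i = pl.length - 1 ∧ e ≠ seqLength := by
              constructor
              · omega
              · intro hx; exact hne (by rw [hx])
            simp [hcond])]
      rw [pvBLoop]
      simp only [hb, he]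
      cases hre : rest with
      | nil =>
        have hilast : i = pl.length - 1 := by
          have := congrArg List.length hdrop1
          simp [List.length_drop, hre] at this
          omega
        rw [pvBLoop, pvBLoop]
        by_cases hesl : e = seqLength
        · simp [hesl, hi0, List.foldl]
        · simp [hesl, List.foldl]
      | cons q rest' =>
        have hinl : i ≠ pl.length - 1 := by
          have := congrArg List.length hdrop1
          simp [List.length_drop, hre] at this
          omega
        simp [hinl, hi0, List.foldl]

-- the structural loop in terms of the two parsed lists
lemma pvBLoop_char : ∀ (l : List (List String)) (s : Bool) (pe : Option Int),
    pvBLoop l s pe =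
      match l.mapM pvF1, l.mapM pvF2 with
      | some bs, some es => some (s && pvChain pe bs es, es.foldl (fun _ e => some e) pe)
      | _, _ => none := by
  intro l
  induction l with
  | nil => intro s pe; simp [pvBLoop, pvChain]
  | cons p rest ih =>
    intro s pe
    rw [pvBLoop]
    cases hb : PySem.Int.ofStr? (PySem.List.pyGetD p 1 "") with
    | none => simp [List.mapM_cons, pvF1, hb]
    | some b =>
    cases he : PySem.Int.ofStr? (PySem.List.pyGetD p 2 "") with
    | none => simp [List.mapM_cons, pvF1, pvF2, hb, he]
    | some e =>
    simp only []
    rw [ih]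
    cases h1 : rest.mapM pvF1 with
    | none =>
      have hA : (p :: rest).mapM pvF1 = none := by simp [List.mapM_cons, pvF1, hb, h1]
      simp [h1, hA]
    | some bs =>
    cases h2 : rest.mapM pvF2 with
    | none =>
      have hB : (p :: rest).mapM pvF2 = none := by simp [List.mapM_cons, pvF2, he, h2]
      simp [List.mapM_cons, pvF1, hb, h1, h2, hB]
    | some es =>
      have hA : (p :: rest).mapM pvF1 = some (b :: bs) := by simp [List.mapM_cons, pvF1, hb, h1]
      have hB : (p :: rest).mapM pvF2 = some (e :: es) := by simp [List.mapM_cons, pvF2, he, h2]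
      simp only [hA, hB, List.foldl_cons]
      rw [Option.some.injEq, Prod.mk.injEq]
      refine ⟨?_, rfl⟩
      simp only [pvChain]
      cases pe with
      | none =>
        by_cases h4 : b = 1
        · subst h4
          by_cases h5 : e < 1
          · simp [h5, show ¬ (1 : Int) ≤ e by omega]
          · simp [h5, show (1 : Int) ≤ e by omega]
        · simp [h4]
      | some q =>
        by_cases h4 : b = q + 1
        · subst h4
          by_cases h5 : e < q + 1
          · simp [h5, show ¬ q + 1 ≤ e by omega]
          · simp [h5, show q + 1 ≤ e by omega]
        · simp [h4]

-- the chain condition as a list comparison plus a zip-wise check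
lemma pvChain_eq : ∀ (es bs : List Int) (pe : Option Int), bs.length = es.length →
    pvChain pe bs es =
      (decide (bs = pvExp pe es) && (bs.zip es).all (fun be => decide (be.1 ≤ be.2))) := by
  intro es
  induction es with
  | nil =>
    intro bs pe hlen
    have : bs = [] := List.length_eq_zero_iff.mp (by simpa using hlen)
    subst this; simp [pvChain, pvExp]
  | cons e es ih =>
    intro bs pe hlen
    cases bs with
    | nil => simp at hlen
    | cons b bs' =>
      simp only [pvChain, pvExp]
      rw [ih bs' (some e) (by simpa using hlen)]
      rw [Bool.eq_iff_iff]
      simp only [Bool.and_eq_true, decide_eq_true_eq, List.zip_cons_cons, List.all_cons,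
        List.cons.injEq]
      constructor
      · rintro ⟨⟨hbe, hst⟩, hrest, hall⟩
        cases pe <;> simp_all
      · rintro ⟨⟨⟨hb, hbs⟩, hall⟩⟩
        cases pe <;> simp_all

lemma pvExp_some : ∀ (es : List Int) (x : Int),
    pvExp (some x) es = ((x :: es).dropLast.map (fun e => e + 1)) := by
  intro es
  induction es with
  | nil => intro x; simp [pvExp]
  | cons e es ih => intro x; simp [pvExp, ih e]

lemma pvExp_none (es : List Int) (h : es ≠ []) :
    pvExp none es = 1 :: es.dropLast.map (fun e => e + 1) := by
  cases es with
  | nil => exact absurd rfl h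
  | cons e es => rw [pvExp, pvExp_some]

lemma pvFoldLast : ∀ (es : List Int) (pe : Option Int), es ≠ [] →
    es.foldl (fun _ e => some e) pe = es.getLast? := by
  intro es
  induction es with
  | nil => intro pe h; exact absurd rfl h
  | cons e es ih =>
    intro pe _
    cases es with
    | nil => simp
    | cons f fs => rw [List.foldl_cons, ih (some e) (by simp), List.getLast?_cons_cons]

lemma pvMapM_length {α β : Type} : ∀ (l : List α) (f : α → Option β) (bs : List β),
    l.mapM f = some bs → bs.length = l.length := by
  intro l
  induction l with
  | nil => intro f bs h; simp at h; simp [← h]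
  | cons a l ih =>
    intro f bs h
    rw [List.mapM_cons] at h
    cases hf : f a with
    | none => simp [hf] at h
    | some b =>
      cases hl : l.mapM f with
      | none => simp [hf, hl] at h
      | some bs' =>
        simp [hf, hl] at h
        simp [← h, ih f bs' hl]

-- ===== VERDICT (by name: the statement is the Claim_ definition above) =====
theorem checkPartRangeError_py_spec : Claim_equal_checkPartRangeError_py := by
  intro seqLength partList _ _
  unfold Spec_checkPartRangeError_py checkPartRangeError_py checkPartRangeError_py_alt
  by_cases hpl : partList = []
  · subst hpl; simp
  · rw [if_neg (by simp [List.length_eq_zero_iff, hpl]), if_neg (by simp [List.length_eq_zero_iff, hpl])]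
    rw [pvAGo_eq seqLength partList hpl partList 0 true "" none (by omega) (by simp)
      (by simp) (by intro pe h; cases h)
      (by intro h _; exact absurd (List.length_eq_zero_iff.mp h.symm) hpl)]
    rw [pvBLoop_char]
    have hfold : partList.foldl pvTextStep "" = PySem.Str.join ", " (partList.map pvPartText) :=
      pvExceptLoop_eq_join partList
    cases h1 : partList.mapM pvF1 with
    | none => simpa using pvExceptLoop_eq_join partList
    | some bs =>
    cases h2 : partList.mapM pvF2 with
    | none => simpa using pvExceptLoop_eq_join partList
    | some es =>
    have hes : es ≠ [] := by
      intro h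
      have := pvMapM_length partList pvF2 es h2
      rw [h] at this
      exact hpl (List.length_eq_zero_iff.mp this.symm)
    have hlen : bs.length = es.length := by
      rw [pvMapM_length partList pvF1 bs h1, pvMapM_length partList pvF2 es h2]
    simp only [hfold, pvFoldLast es none hes, pvChain_eq es bs none hlen,
      pvExp_none es hes, PySem.List.pyGet?_neg_one, Bool.true_and]
    by_cases hlast : es.getLast? = some seqLength
    · simp [hlast, Bool.and_comm, Bool.and_assoc, Bool.and_left_comm]
    · simp [hlast]
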